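-- pv_equiv track=rewrite | github.com/RobbeW/Data_Statistiek_R | Deel 3 Algoritmiek/03 Hogere dimensie/Evaluatie/30 Photobooth/solution/solution.nl.py | photobooth
-- ===== SOURCE A (Python) =====
-- def photobooth(rooster):
--     n = len(rooster)
--
--     nieuw = []
--     for r in range(n):
--         rij = []
--         for c in range(n):
--             rij.append(0)
--         nieuw.append(rij)
--
--     for r in range(n):
--         for c in range(n):
--             element = rooster[r][c]
--             if r % 2 == 0 and c % 2 == 0:
--                 nieuw[r // 2][c // 2] = element
--             elif r % 2 == 0 and c % 2 != 0:
--                 nieuw[r // 2][(n + c) // 2] = element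
--             elif r % 2 != 0 and c % 2 == 0:
--                 nieuw[(n + r) // 2][c // 2] = element
--             else:
--                 nieuw[(n + r) // 2][(n + c) // 2] = element
--
--     return nieuw
-- ===== SOURCE B (Python) =====
-- def photobooth(rooster):
--     n = len(rooster)
--     order = list(range(0, n, 2)) + list(range(1, n, 2))
--     return [[rooster[r][c] for c in order] for r in order]
-- ===== Notes on version B (the rewrite author's own statement) =====
-- stated objective: simpler
-- what changed: B precomputes the evens-then-odds index permutation once and gathers the result with a double comprehension, replacing A's zero-filled buffer and four-way parity-branch scatter.
import Mathlib
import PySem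

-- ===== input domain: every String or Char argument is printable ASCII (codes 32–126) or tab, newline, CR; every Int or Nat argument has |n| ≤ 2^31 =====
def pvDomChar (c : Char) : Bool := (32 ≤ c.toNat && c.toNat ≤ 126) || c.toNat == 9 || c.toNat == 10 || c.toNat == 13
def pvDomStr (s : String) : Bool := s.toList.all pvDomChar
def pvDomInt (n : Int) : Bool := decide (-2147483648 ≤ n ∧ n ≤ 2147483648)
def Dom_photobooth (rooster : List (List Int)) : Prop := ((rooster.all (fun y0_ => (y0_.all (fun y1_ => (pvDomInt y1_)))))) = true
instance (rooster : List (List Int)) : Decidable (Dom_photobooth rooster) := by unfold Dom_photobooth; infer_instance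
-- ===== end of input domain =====

-- B gathers through one precomputed evens-then-odds index permutation instead of A's
-- zero-filled buffer and four-way parity-branch scatter; return values are proved equal.

-- ===== PORT A =====
-- literal transliteration: zero matrix built by appending, then the four-way parity scatter
def photobooth (rooster : List (List Int)) : List (List Int) :=
  let n := rooster.length
  let nieuw := (List.range n).foldl (fun acc _ =>
    acc ++ [(List.range n).foldl (fun rij _ => rij ++ [(0 : Int)]) []]) []
  (List.range n).foldl (fun acc r =>
    (List.range n).foldl (fun acc c =>
      let element := (rooster.getD r []).getD c 0
      if r % 2 == 0 && c % 2 == 0 then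
        acc.set (r / 2) ((acc.getD (r / 2) []).set (c / 2) element)
      else if r % 2 == 0 && c % 2 != 0 then
        acc.set (r / 2) ((acc.getD (r / 2) []).set ((n + c) / 2) element)
      else if r % 2 != 0 && c % 2 == 0 then
        acc.set ((n + r) / 2) ((acc.getD ((n + r) / 2) []).set (c / 2) element)
      else
        acc.set ((n + r) / 2) ((acc.getD ((n + r) / 2) []).set ((n + c) / 2) element)
    ) acc) nieuw

-- ===== PORT B =====
-- order = list(range(0,n,2)) + list(range(1,n,2)); then a gathering double comprehension
def photobooth_alt (rooster : List (List Int)) : List (List Int) :=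
  let n := rooster.length
  let order := List.range' 0 ((n + 1) / 2) 2 ++ List.range' 1 (n / 2) 2
  order.map (fun r => order.map (fun c => (rooster.getD r []).getD c 0))

-- ===== PRECONDITION & SPEC =====
-- Pre_ excludes exactly the ragged grids with a row shorter than the number of rows,
-- on which Python A raises IndexError (B raises there too).
def Pre_photobooth (rooster : List (List Int)) : Prop :=
  ∀ row ∈ rooster, rooster.length ≤ row.length
instance (rooster : List (List Int)) : Decidable (Pre_photobooth rooster) := by
  unfold Pre_photobooth; infer_instance

def pvWitness_photobooth : List (List Int) := [[1, 2, 3], [4, 5, 6], [7, 8, 9]]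

def Spec_photobooth (rooster : List (List Int)) (out : List (List Int)) : Prop := out = photobooth_alt rooster
instance (rooster : List (List Int)) (out : List (List Int)) : Decidable (Spec_photobooth rooster out) := by unfold Spec_photobooth; infer_instance

-- ===== CLAIM (what is proved, stated in full; the proofs are below) =====
def Claim_equal_photobooth : Prop := ∀ (rooster : List (List Int)), Dom_photobooth rooster → Pre_photobooth rooster → Spec_photobooth rooster (photobooth rooster)

-- ===== LEMMAS AND PROOFS =====

-- the common row/column index permutation A scatters through
def pvF (n x : Nat) : Nat := if x % 2 = 0 then x / 2 else (n + x) / 2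

-- its inverse on [0, n): position i is read from source index pvG n i
def pvG (n i : Nat) : Nat := if i < (n + 1) / 2 then 2 * i else 2 * (i - (n + 1) / 2) + 1

lemma pvF_pvG {n i : Nat} (_h : i < n) : pvF n (pvG n i) = i := by
  unfold pvF pvG; split_ifs <;> omega

lemma pvG_lt {n i : Nat} (h : i < n) : pvG n i < n := by
  unfold pvG; split_ifs <;> omega

lemma pvF_inj {n x y : Nat} (hx : x < n) (hy : y < n) (h : pvF n x = pvF n y) : x = y := by
  unfold pvF at h; split_ifs at h <;> omega

-- building by repeated append = replicate
lemma foldl_append_replicate {α : Type} (x : α) :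
    ∀ (l : List Nat) (init : List α),
      l.foldl (fun a _ => a ++ [x]) init = init ++ List.replicate l.length x := by
  intro l
  induction l with
  | nil => simp
  | cons hd t ih =>
    intro init
    rw [List.foldl_cons, ih]
    simp [List.replicate_succ]

-- last-write-wins characterisation of a scatter fold
lemma foldl_set_getElem? {α : Type} (tgt : Nat → Nat) (val : Nat → α) :
    ∀ (l : List Nat) (z : List α) (j : Nat),
      (l.foldl (fun acc i => acc.set (tgt i) (val i)) z)[j]? =
        match l.reverse.find? (fun i => tgt i == j) with
        | some i => if j < z.length then some (val i) else none
        | none => z[j]? := by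
  intro l
  induction l with
  | nil =>
    intro z j; simp only [List.foldl_nil, List.reverse_nil, List.find?_nil]
  | cons a t ih =>
    intro z j
    rw [List.foldl_cons, ih, List.reverse_cons, List.find?_append]
    cases ht : t.reverse.find? (fun i => tgt i == j) with
    | some i => simp [List.length_set]
    | none =>
      simp only [Option.none_or]
      by_cases hj : tgt a = j
      · rw [List.find?_cons_of_pos (by simpa using hj)]
        subst hj
        by_cases hlt : tgt a < z.length
        · simp [hlt]
        · rw [List.set_eq_of_length_le (by omega)]
          have hz : z[tgt a]? = none := List.getElem?_eq_none_iff.mpr (by omega)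
          simp [hlt]
      · rw [List.find?_cons_of_neg (by simpa using hj), List.find?_nil]
        exact List.getElem?_set_ne hj

-- find? returns the unique satisfying element, in any order
lemma find?_unique {p : Nat → Bool} :
    ∀ {l : List Nat} {c : Nat}, c ∈ l → p c = true →
      (∀ x ∈ l, p x = true → x = c) → l.find? p = some c := by
  intro l
  induction l with
  | nil => intro c hc; simp at hc
  | cons a t ih =>
    intro c hc hpc huniq
    rcases List.mem_cons.mp hc with h | h
    · subst h; simp [hpc]
    · by_cases ha : p a = true
      · have := huniq a (by simp) ha; subst this
        simp [hpc]
      · rw [List.find?_cons_of_neg (by simpa using ha)]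
        exact ih h hpc (fun x hx => huniq x (List.mem_cons_of_mem _ hx))

-- a fold whose every step writes the same fixed row localises to one List.set
lemma foldl_set_row {α : Type} (tr : Nat) (tc : Nat → Nat) (val : Nat → α) :
    ∀ (l : List Nat) (acc : List (List α)), tr < acc.length →
      l.foldl (fun a c => a.set tr ((a.getD tr []).set (tc c) (val c))) acc
        = acc.set tr (l.foldl (fun row c => row.set (tc c) (val c)) (acc.getD tr [])) := by
  intro l
  induction l with
  | nil =>
    intro acc h
    simp only [List.foldl_nil, List.getD]
    rw [List.getElem?_eq_getElem h]
    simp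
  | cons c t ih =>
    intro acc htr
    simp only [List.foldl_cons]
    rw [ih _ (by simpa using htr)]
    rw [List.set_set]
    congr 1
    simp [List.getD, htr]

-- fold congruence under an invariant
lemma foldl_congr_inv {α β : Type} (P : β → Prop) (step1 step2 : β → α → β) :
    ∀ (l : List α) (z : β), P z →
      (∀ a x, x ∈ l → P a → step1 a x = step2 a x) →
      (∀ a x, P a → P (step2 a x)) →
      l.foldl step1 z = l.foldl step2 z := by
  intro l
  induction l with
  | nil => intro z _ _ _; rfl
  | cons a t ih =>
    intro z hz hstep hpres
    simp only [List.foldl_cons]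
    rw [hstep z a (by simp) hz]
    exact ih _ (hpres z a hz) (fun b x hx => hstep b x (List.mem_cons_of_mem _ hx)) hpres

-- the gather order used by B
def pvOrder (n : Nat) : List Nat := List.range' 0 ((n + 1) / 2) 2 ++ List.range' 1 (n / 2) 2

lemma pvOrder_length (n : Nat) : (pvOrder n).length = n := by
  simp [pvOrder]; omega

lemma pvOrder_getElem? {n i : Nat} (h : i < n) : (pvOrder n)[i]? = some (pvG n i) := by
  unfold pvOrder pvG
  by_cases hi : i < (n + 1) / 2
  · rw [List.getElem?_append_left (by simpa using hi)]
    rw [List.getElem?_range' (by simpa using hi)]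
    simp [hi]
  · rw [List.getElem?_append_right (by simp; omega)]
    rw [List.getElem?_range' (by simp; omega)]
    simp [hi]
    omega

-- the unique source index the reversed scan finds for target j (for any list of candidates
-- equal to (range n).reverse)
lemma find?_pvF {n j : Nat} (hj : j < n) :
    (List.range n).reverse.find? (fun i => pvF n i == j) = some (pvG n j) := by
  apply find?_unique
  · simp [List.mem_reverse, List.mem_range]; exact pvG_lt hj
  · simp [pvF_pvG hj]
  · intro x hx hpx
    simp only [List.mem_reverse, List.mem_range] at hx
    simp only [beq_iff_eq] at hpx
    exact pvF_inj hx (pvG_lt hj) (by rw [hpx, pvF_pvG hj])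

-- one-dimensional version of the scatter = gather fact: scattering the values of a row of
-- length ≥ n through pvF into any buffer of length n yields B's gathered row
lemma scatter_row_eq_gather (n : Nat) (row : List Int) (z : List Int) (hz : z.length = n) :
    (List.range n).foldl (fun acc c => acc.set (pvF n c) (row.getD c 0)) z
      = (pvOrder n).map (fun c => row.getD c 0) := by
  apply List.ext_getElem?
  intro j
  rw [foldl_set_getElem? (pvF n) (fun c => row.getD c 0) (List.range n) z j]
  by_cases hj : j < n
  · rw [find?_pvF hj]
    simp [hz, hj, pvOrder_getElem? hj]
  · cases hfind : (List.range n).reverse.find? (fun i => pvF n i == j) with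
    | some i =>
      have := List.find?_some hfind
      have hi := List.mem_reverse.mp (List.mem_of_find?_eq_some hfind)
      simp only [List.mem_range] at hi
      simp only [beq_iff_eq] at this
      exfalso
      have : pvF n i < n := by unfold pvF; split_ifs <;> omega
      omega
    | none =>
      have h1 : z[j]? = none := by rw [List.getElem?_eq_none_iff]; omega
      have h2 : ((pvOrder n).map (fun c => row.getD c 0))[j]? = none := by
        rw [List.getElem?_eq_none_iff, List.length_map, pvOrder_length]; omega
      rw [h1, h2]

-- all rows of the working matrix keep length n
def pvInv (n : Nat) (acc : List (List Int)) : Prop :=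
  acc.length = n ∧ ∀ row ∈ acc, row.length = n

-- A's four-branch inner loop body is the uniform scatter write through pvF
lemma branch_eq_uniform (n r c : Nat) (acc : List (List Int)) (e : Int) :
    (if r % 2 == 0 && c % 2 == 0 then
        acc.set (r / 2) ((acc.getD (r / 2) []).set (c / 2) e)
      else if r % 2 == 0 && c % 2 != 0 then
        acc.set (r / 2) ((acc.getD (r / 2) []).set ((n + c) / 2) e)
      else if r % 2 != 0 && c % 2 == 0 then
        acc.set ((n + r) / 2) ((acc.getD ((n + r) / 2) []).set (c / 2) e)
      else
        acc.set ((n + r) / 2) ((acc.getD ((n + r) / 2) []).set ((n + c) / 2) e))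
      = acc.set (pvF n r) ((acc.getD (pvF n r) []).set (pvF n c) e) := by
  unfold pvF
  by_cases hr : r % 2 = 0 <;> by_cases hc : c % 2 = 0 <;> simp [hr, hc]

-- the outer fold, rewritten row by row, is a matrix-level scatter of B's gathered rows
lemma outer_fold_eq (rooster : List (List Int)) (n : Nat) (hn : n = rooster.length) :
    (List.range n).foldl (fun acc r =>
      (List.range n).foldl (fun acc c =>
        acc.set (pvF n r) ((acc.getD (pvF n r) []).set (pvF n c) ((rooster.getD r []).getD c 0))) acc)
      (List.replicate n (List.replicate n (0 : Int)))
      = (List.range n).foldl (fun acc r =>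
          acc.set (pvF n r) ((pvOrder n).map (fun c => (rooster.getD r []).getD c 0)))
        (List.replicate n (List.replicate n (0 : Int))) := by
  apply foldl_congr_inv (pvInv n)
  · constructor
    · simp
    · intro row hrow; simp at hrow; simp [hrow.2]
  · intro acc r hr hacc
    have hrn : r < n := by simpa using hr
    have htr : pvF n r < acc.length := by
      rw [hacc.1]; unfold pvF; split_ifs <;> omega
    rw [foldl_set_row (pvF n r) (pvF n) (fun c => (rooster.getD r []).getD c 0) _ _ htr]
    congr 1
    apply scatter_row_eq_gather
    have hmem : (acc.getD (pvF n r) []) ∈ acc := by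
      have : acc[pvF n r]? = some (acc.getD (pvF n r) []) := by
        simp [List.getD, List.getElem?_eq_getElem htr]
      exact List.mem_of_getElem? this
    exact hacc.2 _ hmem
  · intro acc r hacc
    refine ⟨by simp [hacc.1], ?_⟩
    intro row hrow
    rcases List.mem_or_eq_of_mem_set hrow with h | h
    · exact hacc.2 _ h
    · subst h; simp [pvOrder_length]

theorem photobooth_eq_alt (rooster : List (List Int)) :
    photobooth rooster = photobooth_alt rooster := by
  unfold photobooth photobooth_alt
  set n := rooster.length with hn
  simp only []
  -- the zero matrix
  have hzrow : (List.range n).foldl (fun rij _ => rij ++ [(0 : Int)]) [] = List.replicate n 0 := by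
    rw [foldl_append_replicate]; simp
  have hz : (List.range n).foldl (fun acc _ =>
      acc ++ [(List.range n).foldl (fun rij _ => rij ++ [(0 : Int)]) []]) [] =
      List.replicate n (List.replicate n (0 : Int)) := by
    rw [hzrow, foldl_append_replicate]; simp
  rw [hz]
  -- four-way branch → uniform scatter
  have hbody : (fun (acc : List (List Int)) r =>
      (List.range n).foldl (fun acc c =>
        let element := (rooster.getD r []).getD c 0
        if r % 2 == 0 && c % 2 == 0 then
          acc.set (r / 2) ((acc.getD (r / 2) []).set (c / 2) element)
        else if r % 2 == 0 && c % 2 != 0 then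
          acc.set (r / 2) ((acc.getD (r / 2) []).set ((n + c) / 2) element)
        else if r % 2 != 0 && c % 2 == 0 then
          acc.set ((n + r) / 2) ((acc.getD ((n + r) / 2) []).set (c / 2) element)
        else
          acc.set ((n + r) / 2) ((acc.getD ((n + r) / 2) []).set ((n + c) / 2) element)) acc)
      = (fun (acc : List (List Int)) r =>
      (List.range n).foldl (fun acc c =>
        acc.set (pvF n r) ((acc.getD (pvF n r) []).set (pvF n c) ((rooster.getD r []).getD c 0))) acc) := by
    funext acc r
    congr 1
    funext a c
    exact branch_eq_uniform n r c a _
  rw [hbody, outer_fold_eq rooster n hn]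
  rw [show (List.range' 0 ((n + 1) / 2) 2 ++ List.range' 1 (n / 2) 2) = pvOrder n from rfl]
  -- elementwise comparison of the matrix scatter with B's gather
  apply List.ext_getElem?
  intro i
  rw [foldl_set_getElem? (pvF n) (fun r => (pvOrder n).map (fun c => (rooster.getD r []).getD c 0))]
  by_cases hi : i < n
  · rw [find?_pvF hi]
    have : ((pvOrder n).map (fun r => (pvOrder n).map (fun c => (rooster.getD r []).getD c 0)))[i]?
        = some ((pvOrder n).map (fun c => (rooster.getD (pvG n i) []).getD c 0)) := by
      rw [List.getElem?_map, pvOrder_getElem? hi]; rfl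
    rw [this]
    simp [hi]
  · cases hfind : (List.range n).reverse.find? (fun r => pvF n r == i) with
    | some r =>
      have hp := List.find?_some hfind
      have hr := List.mem_reverse.mp (List.mem_of_find?_eq_some hfind)
      simp only [List.mem_range] at hr
      simp only [beq_iff_eq] at hp
      exfalso
      have : pvF n r < n := by unfold pvF; split_ifs <;> omega
      omega
    | none =>
      have h1 : (List.replicate n (List.replicate n (0 : Int)))[i]? = none := by
        rw [List.getElem?_eq_none_iff]; simp; omega
      have h2 : ((pvOrder n).map (fun r => (pvOrder n).map (fun c => (rooster.getD r []).getD c 0)))[i]? = none := by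
        rw [List.getElem?_eq_none_iff, List.length_map, pvOrder_length]; omega
      rw [h1, h2]

-- ===== VERDICT (by name: the statement is the Claim_ definition above) =====
theorem photobooth_spec : Claim_equal_photobooth := by
  intro rooster _ _
  unfold Spec_photobooth
  exact photobooth_eq_alt rooster
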